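-- pv_equiv track=rewrite | github.com/rrwt/daily-coding-challenge | gfg/hashing/employees_under_manager.py | heirarchy
-- ===== SOURCE A (Python) =====
-- def get_emp_heirarchy(manager: str, return_dict: dict, man_emp: dict) -> int:
--     count = 0
--
--     for employee in man_emp.get(manager, []):
--         if employee not in return_dict:
--             return_dict[employee] = get_emp_heirarchy(employee, return_dict, man_emp)
--         count += return_dict[employee] + 1
--
--     return count
--
-- def heirarchy(emp_man: dict) -> dict:
--     """
--     Create a manager - employee dictionary
--     Recursively iterate over it to find the number of eemoloyees under each and every manager
--     Time Complexity: O(n)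
--     Space Complexity: O(n)
--     """
--     man_emp: dict = {}
--     return_dict: dict = {}
--
--     for emp, man in emp_man.items():
--         if emp == man:
--             continue
--         if man in man_emp:
--             man_emp[man].append(emp)
--         else:
--             man_emp[man] = [emp]
--
--     for manager in man_emp:
--         return_dict[manager] = get_emp_heirarchy(manager, return_dict, man_emp)
--
--     return return_dict
-- ===== SOURCE B (Python) =====
-- def heirarchy(emp_man: dict) -> dict:
--     """Iterative version: explicit-stack post-order DFS over the manager->employees
--     forest (no recursion, so no recursion-depth limit); a node's count is the sum of
--     child count + 1 over its direct employees, computed when the node is popped the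
--     second time."""
--     man_emp: dict = {}
--     for emp, man in emp_man.items():
--         if emp != man:
--             man_emp.setdefault(man, []).append(emp)
--
--     counts: dict = {}
--     for root in man_emp:
--         stack = [(root, False)]
--         while stack:
--             node, expanded = stack.pop()
--             if expanded:
--                 counts[node] = sum(counts[c] + 1 for c in man_emp.get(node, []))
--             elif node not in counts:
--                 stack.append((node, True))
--                 stack.extend((c, False) for c in reversed(man_emp.get(node, [])))
--     return counts
-- ===== Notes on version B (the rewrite author's own statement) =====
-- stated objective: alternative
-- what changed: Replaces the memoized top-down recursion (helper function recursing through the manager->employees map) by a non-recursive explicit-stack post-order DFS with a two-phase (visit/emit) marker stack, computing each node's count from its already-emitted children; same output including dict insertion order, with no use of the Python call stack.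
import Mathlib
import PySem

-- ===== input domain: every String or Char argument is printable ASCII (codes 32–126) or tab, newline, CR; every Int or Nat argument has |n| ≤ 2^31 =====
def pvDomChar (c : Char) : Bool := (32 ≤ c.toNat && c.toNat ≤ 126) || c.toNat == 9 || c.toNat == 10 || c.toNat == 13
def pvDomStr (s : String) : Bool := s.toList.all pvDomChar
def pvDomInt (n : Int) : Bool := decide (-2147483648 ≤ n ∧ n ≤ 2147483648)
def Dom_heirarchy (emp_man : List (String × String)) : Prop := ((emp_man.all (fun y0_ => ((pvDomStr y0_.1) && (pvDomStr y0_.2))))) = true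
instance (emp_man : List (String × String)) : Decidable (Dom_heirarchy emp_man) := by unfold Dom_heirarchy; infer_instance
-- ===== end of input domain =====

-- B replaces A's memoized top-down recursion by an explicit-stack, two-phase (visit/emit)
-- post-order DFS — no recursion; same return value, including dict insertion order.
-- (Pre_ does not model CPython's recursion limit: on extremely deep chains the Python A
-- raises RecursionError while B still returns.)

-- ===== PORT A =====
-- man_emp building loop of A ('if man in man_emp: append else [emp]')
def aBuild (emp_man : List (String × String)) : PySem.Dict String (List String) :=
  emp_man.foldl
    (fun me p =>
      if p.1 == p.2 then me
      else
        match me.get? p.2 with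
        | some l => me.insert p.2 (l ++ [p.1])
        | none => me.insert p.2 [p.1])
    PySem.Dict.empty

-- get_emp_heirarchy: fuel = recursion depth (a totality guard only; Pre_ keeps it unreachable,
-- 'none' = the recursion would not return).  aLoop is the 'for employee in man_emp.get(...)' body.
mutual
def aGo (me : PySem.Dict String (List String)) :
    Nat → String → PySem.Dict String Int → Option (PySem.Dict String Int × Int)
  | 0, _, _ => none
  | Nat.succ f, n, memo => aLoop me f (me.getD n []) memo 0
  termination_by f _ _ => (f, 0)

def aLoop (me : PySem.Dict String (List String)) :
    Nat → List String → PySem.Dict String Int → Int → Option (PySem.Dict String Int × Int)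
  | _, [], memo, cnt => some (memo, cnt)
  | f, e :: rest, memo, cnt =>
    match memo.get? e with
    | some v => aLoop me f rest memo (cnt + v + 1)
    | none =>
      match aGo me f e memo with
      | none => none
      | some (d, c) =>
        let memo' := d.insert e c
        aLoop me f rest memo' (cnt + memo'.getD e 0 + 1)
  termination_by f es _ _ => (f, es.length + 1)
end

def heirarchy (emp_man : List (String × String)) : List (String × Int) :=
  let me := aBuild emp_man
  let res := me.items.foldl
    (fun (o : Option (PySem.Dict String Int)) p =>
      match o with
      | none => none
      | some memo =>
        match aGo me (emp_man.length + 3) p.1 memo with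
        | none => none
        | some (d, c) => some (d.insert p.1 c))
    (some PySem.Dict.empty)
  match res with
  | some r => r.items
  | none => []

-- ===== PORT B =====
-- man_emp building loop of B: 'man_emp.setdefault(man, []).append(emp)' ≡ d[man] = d.get(man, []) + [emp]
def bBuild (emp_man : List (String × String)) : PySem.Dict String (List String) :=
  emp_man.foldl
    (fun me p =>
      if p.1 == p.2 then me
      else me.modify p.2 [] (fun l => l ++ [p.1]))
    PySem.Dict.empty

-- 'sum(counts[c] + 1 for c in man_emp.get(node, []))'; counts[c] as getD (on admitted inputs the
-- key is always present when this line runs, so this matches Python exactly there)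
def bSum (me : PySem.Dict String (List String)) (memo : PySem.Dict String Int) (n : String) : Int :=
  (me.getD n []).foldl (fun s c => s + (memo.getD c 0 + 1)) 0

-- the 'while stack:' loop; head of the list = top of the Python stack, so
-- append+extend(reversed(kids)) pushes '(kids in order) ++ (node, True) :: rest'.
-- fuel is a totality guard counting expansions (unreachable on Pre_ inputs).
def runB (me : PySem.Dict String (List String)) :
    Nat → List (String × Bool) → PySem.Dict String Int → Option (PySem.Dict String Int)
  | _, [], memo => some memo
  | f, (n, true) :: rest, memo => runB me f rest (memo.insert n (bSum me memo n))
  | f, (n, false) :: rest, memo =>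
    if (memo.get? n).isSome then runB me f rest memo
    else
      match f with
      | 0 => none
      | Nat.succ f' =>
        runB me f' (((me.getD n []).map (fun c => (c, false))) ++ (n, true) :: rest) memo
termination_by f s _ => (f, s.length)

def heirarchy_alt (emp_man : List (String × String)) : List (String × Int) :=
  let me := bBuild emp_man
  let res := me.items.foldl
    (fun (o : Option (PySem.Dict String Int)) p =>
      match o with
      | none => none
      | some memo => runB me (emp_man.length + 2) [(p.1, false)] memo)
    (some PySem.Dict.empty)
  match res with
  | some r => r.items
  | none => []

-- ===== PRECONDITION & SPEC =====
-- chaseL l k x = 'the manager chain starting at x terminates (absent or self-managed manager)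
-- within k steps' — a property of the input graph, checked by pointer chasing.
def chaseL (emp_man : List (String × String)) : Nat → String → Bool
  | 0, _ => false
  | Nat.succ k, x =>
    match emp_man.find? (fun p => p.1 == x) with
    | none => true
    | some p => p.2 == x || chaseL emp_man k p.2

-- Pre_ excludes (a) association lists with duplicate keys, which do not represent any Python
-- dict (the argument is a dict, so its items list always has distinct keys), and (b) inputs
-- whose manager chains cycle, on which A raises RecursionError (and B does not return).
def Pre_heirarchy (emp_man : List (String × String)) : Prop :=
  (emp_man.map Prod.fst).Nodup ∧
  ∀ p ∈ emp_man, chaseL emp_man (emp_man.length + 1) p.1 = true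

instance (emp_man : List (String × String)) : Decidable (Pre_heirarchy emp_man) := by
  unfold Pre_heirarchy; infer_instance

def pvWitness_heirarchy : (List (String × String)) := [("a", "b"), ("c", "b"), ("d", "d")]

def Spec_heirarchy (emp_man : List (String × String)) (out : List (String × Int)) : Prop := out = heirarchy_alt emp_man
instance (emp_man : List (String × String)) (out : List (String × Int)) : Decidable (Spec_heirarchy emp_man out) := by unfold Spec_heirarchy; infer_instance

-- ===== CLAIM (what is proved, stated in full; the proofs are below) =====
def Claim_equal_heirarchy : Prop := ∀ (emp_man : List (String × String)), Dom_heirarchy emp_man → Pre_heirarchy emp_man → Spec_heirarchy emp_man (heirarchy emp_man)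

-- ===== LEMMAS AND PROOFS =====

-- 'termination of the chain from x is witnessed by some amount of fuel'
def TChain (emp_man : List (String × String)) (x : String) : Prop :=
  ∃ k, chaseL emp_man k x = true

-- the two builds produce the same children dict
theorem build_eq (emp_man : List (String × String)) : aBuild emp_man = bBuild emp_man := by
  unfold aBuild bBuild
  apply List.foldl_ext
  intro d p _
  by_cases h : (p.1 == p.2) = true
  · simp [h]
  · simp only [Bool.not_eq_true] at h
    simp only [h]
    rcases hg : d.get? p.2 with _ | l
    · simp [PySem.Dict.modify, PySem.Dict.getD, hg]
    · simp [PySem.Dict.modify, PySem.Dict.getD, hg]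

theorem bBuild_foldl (emp_man : List (String × String)) :
    ∀ (i : PySem.Dict String (List String)),
      emp_man.foldl
        (fun me p =>
          if p.1 == p.2 then me
          else me.modify p.2 [] (fun l => l ++ [p.1])) i =
      (emp_man.filter (fun p => !(p.1 == p.2))).foldl
        (fun d p => d.modify p.2 [] (fun l => l ++ [p.1])) i := by
  induction emp_man with
  | nil => intro i; rfl
  | cons x xs ih =>
    intro i
    by_cases h : (x.1 == x.2) = true
    · simp only [List.foldl_cons, List.filter_cons, h, Bool.not_true, Bool.false_eq_true,
        if_true, if_false]
      exact ih i
    · simp only [Bool.not_eq_true] at h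
      simp only [List.foldl_cons, List.filter_cons, h, Bool.not_false, Bool.false_eq_true,
        if_true, if_false]
      exact ih _

theorem kids_eq (emp_man : List (String × String)) (m : String) :
    (bBuild emp_man).getD m [] =
      ((emp_man.filter (fun p => !(p.1 == p.2))).filter (fun p => p.2 == m)).map Prod.fst := by
  unfold bBuild
  rw [bBuild_foldl]
  have h2 : ((emp_man.filter (fun p => !(p.1 == p.2))).map Prod.swap).foldl
      (fun d p => d.modify p.1 [] (fun l => l ++ [p.2])) PySem.Dict.empty =
      (emp_man.filter (fun p => !(p.1 == p.2))).foldl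
      (fun d p => d.modify p.2 [] (fun l => l ++ [p.1])) PySem.Dict.empty := by
    rw [List.foldl_map]
    apply List.foldl_ext
    intro a b _
    simp
  rw [← h2, PySem.Dict.getD_foldl_modify_append]
  simp [List.filter_map, List.map_map, Function.comp]

theorem find?_nodup (emp_man : List (String × String))
    (hnd : (emp_man.map Prod.fst).Nodup) {e m : String} (hmem : (e, m) ∈ emp_man) :
    emp_man.find? (fun p => p.1 == e) = some (e, m) := by
  induction emp_man with
  | nil => cases hmem
  | cons x xs ih =>
    simp only [List.map_cons, List.nodup_cons] at hnd
    rcases List.mem_cons.mp hmem with h | h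
    · subst h
      simp
    · have hx : (x.1 == e) = false := by
        apply beq_eq_false_iff_ne.mpr
        intro hxe
        exact hnd.1 (hxe ▸ List.mem_map_of_mem h)
      rw [List.find?_cons, hx]
      exact ih hnd.2 h

theorem chase_shift (emp_man : List (String × String)) {e m : String}
    (hf : emp_man.find? (fun p => p.1 == e) = some (e, m)) (hne : (m == e) = false) :
    ∀ k, chaseL emp_man (k + 1) e = chaseL emp_man k m := by
  intro k
  rw [chaseL, hf]
  simp [hne]

theorem tchain_shift (emp_man : List (String × String)) {e m : String}
    (hf : emp_man.find? (fun p => p.1 == e) = some (e, m)) (hne : (m == e) = false)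
    (he : TChain emp_man e) : TChain emp_man m := by
  rcases he with ⟨k, hk⟩
  rcases k with _ | k
  · simp [chaseL] at hk
  · exact ⟨k, by rw [← chase_shift emp_man hf hne k]; exact hk⟩

theorem rank_child (emp_man : List (String × String)) {e m : String}
    (hf : emp_man.find? (fun p => p.1 == e) = some (e, m)) (hne : (m == e) = false)
    (he : TChain emp_man e) (hm : TChain emp_man m) :
    Nat.find he = Nat.find hm + 1 := by
  apply le_antisymm
  · apply Nat.find_le
    rw [chase_shift emp_man hf hne]
    exact Nat.find_spec hm
  · have h1 := Nat.find_spec he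
    rcases hk : Nat.find he with _ | j
    · rw [hk] at h1; simp [chaseL] at h1
    · rw [hk] at h1
      rw [chase_shift emp_man hf hne] at h1
      have h2 : Nat.find hm ≤ j := Nat.find_le h1
      omega

theorem get?_of_prefix {ν : Type} (memo d : PySem.Dict String ν) (Δ : List (String × ν))
    (hit : d.items = memo.items ++ Δ) (k : String) (v : ν)
    (hk : memo.get? k = some v) : d.get? k = some v := by
  rcases hf : memo.items.find? (fun p => p.1 == k) with _ | p
  · rw [PySem.Dict.get?, hf] at hk; cases hk
  · rw [PySem.Dict.get?, hf] at hk
    rw [PySem.Dict.get?, hit, List.find?_append, hf]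
    simpa using hk
theorem getD_of_prefix {ν : Type} [Inhabited ν] (memo d : PySem.Dict String ν) (Δ : List (String × ν))
    (hit : d.items = memo.items ++ Δ) (k : String) (d0 : ν)
    (hk : k ∈ memo.keys) : d.getD k d0 = memo.getD k d0 := by
  rcases hv : memo.get? k with _ | v
  · exact absurd ((PySem.Dict.get?_eq_none_iff_not_mem_keys memo k).mp hv) (by simpa using hk)
  · rw [PySem.Dict.getD, PySem.Dict.getD, hv, get?_of_prefix memo d Δ hit k v hv]

theorem keys_of_prefix {ν : Type} (memo d : PySem.Dict String ν) (Δ : List (String × ν))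
    (hit : d.items = memo.items ++ Δ) : d.keys = memo.keys ++ Δ.map Prod.fst := by
  simp only [PySem.Dict.keys, hit, List.map_append]

theorem insert_same {ν : Type} (d : PySem.Dict String ν) (k : String) (v : ν)
    (hnd : d.keys.Nodup) (hv : d.get? k = some v) : d.insert k v = d := by
  apply PySem.Dict.ext
  have hc : d.contains k = true := by
    rw [PySem.Dict.contains_eq_isSome_get?, hv]; rfl
  rw [PySem.Dict.items_insert_of_contains d v hc]
  conv_rhs => rw [← List.map_id d.items]
  apply List.map_congr_left
  intro p hp
  by_cases hpk : (p.1 == k) = true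
  · have : p = (k, v) := by
      have h1 : p.1 = k := by simpa using hpk
      have h2 : d.get? p.1 = some p.2 := PySem.Dict.get?_of_mem_items d hp hnd
      rw [h1, hv] at h2
      cases p
      simp_all
    simp [this]
  · simp [hpk]

theorem mem_kids (emp_man : List (String × String)) {e m : String}
    (h : e ∈ (bBuild emp_man).getD m []) : (e, m) ∈ emp_man ∧ (e == m) = false := by
  rw [kids_eq] at h
  rcases List.mem_map.mp h with ⟨p, hp, hpe⟩
  rcases List.mem_filter.mp hp with ⟨hp1, hp2⟩
  rcases List.mem_filter.mp hp1 with ⟨hp3, hp4⟩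
  have h1 : p.2 = m := by simpa using hp2
  have h2 : (p.1 == p.2) = false := by simpa using hp4
  constructor
  · have : p = (e, m) := by cases p; simp_all
    exact this ▸ hp3
  · rw [← hpe, ← h1]; exact h2

theorem kid_rank (emp_man : List (String × String))
    (hnd : (emp_man.map Prod.fst).Nodup)
    (hpre : ∀ p ∈ emp_man, chaseL emp_man (emp_man.length + 1) p.1 = true)
    {n e : String} (hn : TChain emp_man n)
    (he' : e ∈ (bBuild emp_man).getD n []) :
    ∃ h : TChain emp_man e, Nat.find h = Nat.find hn + 1 ∧ Nat.find h ≤ emp_man.length + 1 := by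
  rcases mem_kids emp_man he' with ⟨hmem, hne⟩
  have he : TChain emp_man e := ⟨_, hpre (e, n) hmem⟩
  have hfind := find?_nodup emp_man hnd hmem
  have hne' : (n == e) = false := by
    apply beq_eq_false_iff_ne.mpr
    intro hh
    exact (beq_eq_false_iff_ne.mp hne) hh.symm
  refine ⟨he, rank_child emp_man hfind hne' he hn, Nat.find_le (hpre (e, n) hmem)⟩

theorem succLoop (emp_man : List (String × String)) (f : Nat)
    (IH : ∀ (n : String) (memo : PySem.Dict String Int) (hn : TChain emp_man n),
      Nat.find hn ≤ emp_man.length + 2 →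
      emp_man.length + 3 ≤ f + Nat.find hn →
      aGo (bBuild emp_man) f n memo ≠ none) :
    ∀ (es : List String) (memo : PySem.Dict String Int) (cnt : Int),
      (∀ e ∈ es, ∃ h : TChain emp_man e,
        Nat.find h ≤ emp_man.length + 2 ∧ emp_man.length + 3 ≤ f + Nat.find h) →
      aLoop (bBuild emp_man) f es memo cnt ≠ none := by
  intro es
  induction es with
  | nil => intro memo cnt _; simp [aLoop]
  | cons e rest ihe =>
    intro memo cnt hes
    rw [aLoop]
    rcases hg : (memo.get? e) with _ | v
    · rcases hes e (List.mem_cons_self) with ⟨he, hb1, hb2⟩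
      rcases hgo : aGo (bBuild emp_man) f e memo with _ | ⟨d, c⟩
      · exact absurd hgo (IH e memo he hb1 hb2)
      · exact ihe (d.insert e c) _ (fun x hx => hes x (List.mem_cons_of_mem _ hx))
    · exact ihe memo _ (fun x hx => hes x (List.mem_cons_of_mem _ hx))

theorem succGo (emp_man : List (String × String))
    (hnd : (emp_man.map Prod.fst).Nodup)
    (hpre : ∀ p ∈ emp_man, chaseL emp_man (emp_man.length + 1) p.1 = true) :
    ∀ (f : Nat) (n : String) (memo : PySem.Dict String Int) (hn : TChain emp_man n),
      Nat.find hn ≤ emp_man.length + 2 →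
      emp_man.length + 3 ≤ f + Nat.find hn →
      aGo (bBuild emp_man) f n memo ≠ none := by
  intro f
  induction f with
  | zero => intro n memo hn hb hf; omega
  | succ f ih =>
    intro n memo hn hb hf
    rw [aGo]
    apply succLoop emp_man f ih
    intro e he'
    rcases kid_rank emp_man hnd hpre hn he' with ⟨he, h1, h2⟩
    exact ⟨he, by omega, by omega⟩


-- memo invariant maintained by both programs: keys distinct, every recorded node has all its
-- children recorded, with the recorded value equal to the sum over children of (value + 1)
def InvM (me : PySem.Dict String (List String)) (memo : PySem.Dict String Int) : Prop :=
  memo.keys.Nodup ∧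
  ∀ k ∈ memo.keys, (∀ c ∈ me.getD k [], c ∈ memo.keys) ∧ memo.getD k 0 = bSum me memo k

-- simulation statement for one aGo call (n not yet recorded): A's recursion appends Δ (ending
-- with n itself), keeps the invariant, and B's machine consumes the (n,false) task with
-- Δ.length fuel producing exactly A's dict.
def SimGoStmt (emp_man : List (String × String)) (f : Nat) : Prop :=
  ∀ (n : String) (memo d : PySem.Dict String Int) (c : Int),
    aGo (bBuild emp_man) f n memo = some (d, c) →
    InvM (bBuild emp_man) memo →
    n ∉ memo.keys →
    ∀ (hn : TChain emp_man n),
    ∃ Δ : List (String × Int),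
      (d.insert n c).items = memo.items ++ Δ ∧
      (∀ p ∈ Δ, p.1 ∉ memo.keys ∧ p.1 ∈ n :: emp_man.map Prod.fst ∧
        ∃ h : TChain emp_man p.1, Nat.find hn ≤ Nat.find h) ∧
      InvM (bBuild emp_man) (d.insert n c) ∧
      ∀ (fB : Nat) (rest : List (String × Bool)),
        runB (bBuild emp_man) (fB + Δ.length) ((n, false) :: rest) memo =
        runB (bBuild emp_man) fB rest (d.insert n c)



theorem runB_nil (me : PySem.Dict String (List String)) (f : Nat) (memo : PySem.Dict String Int) :
    runB me f [] memo = some memo := by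
  rw [runB.eq_def]

theorem runB_true (me : PySem.Dict String (List String)) (f : Nat) (n : String)
    (rest : List (String × Bool)) (memo : PySem.Dict String Int) :
    runB me f ((n, true) :: rest) memo = runB me f rest (memo.insert n (bSum me memo n)) := by
  rw [runB.eq_def]

theorem runB_false_skip (me : PySem.Dict String (List String)) (f : Nat) (n : String)
    (rest : List (String × Bool)) (memo : PySem.Dict String Int)
    (h : (memo.get? n).isSome = true) :
    runB me f ((n, false) :: rest) memo = runB me f rest memo := by
  rw [runB.eq_def]
  simp [h]

theorem runB_false_expand (me : PySem.Dict String (List String)) (f : Nat) (n : String)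
    (rest : List (String × Bool)) (memo : PySem.Dict String Int)
    (h : (memo.get? n).isSome = false) :
    runB me (f + 1) ((n, false) :: rest) memo =
      runB me f (((me.getD n []).map (fun c => (c, false))) ++ (n, true) :: rest) memo := by
  rw [runB.eq_def]
  simp [h]

theorem bSum_congr (me : PySem.Dict String (List String)) (d1 d2 : PySem.Dict String Int)
    (n : String) (h : ∀ c ∈ me.getD n [], d1.getD c 0 = d2.getD c 0) :
    bSum me d1 n = bSum me d2 n := by
  unfold bSum
  apply List.foldl_ext
  intro a b hb
  rw [h b hb]

theorem mem_keys_of_get? {ν : Type} (d : PySem.Dict String ν) (k : String) (v : ν)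
    (h : d.get? k = some v) : k ∈ d.keys := by
  by_contra hn
  rw [(PySem.Dict.get?_eq_none_iff_not_mem_keys d k).mpr hn] at h
  cases h

theorem getD_eq_of_get? {ν : Type} [Inhabited ν] (d : PySem.Dict String ν) (k : String) (v d0 : ν)
    (h : d.get? k = some v) : d.getD k d0 = v := by
  rw [PySem.Dict.getD, h]; rfl

theorem simLoop (emp_man : List (String × String))
    (f r : Nat) (IH : SimGoStmt emp_man f) :
    ∀ (es : List String) (memo d : PySem.Dict String Int) (cnt c : Int),
      aLoop (bBuild emp_man) f es memo cnt = some (d, c) →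
      InvM (bBuild emp_man) memo →
      (∀ e ∈ es, ∃ m, e ∈ (bBuild emp_man).getD m [] ∧ ∃ h : TChain emp_man e, Nat.find h = r + 1) →
      ∃ Δ : List (String × Int),
        d.items = memo.items ++ Δ ∧
        (∀ p ∈ Δ, p.1 ∉ memo.keys ∧ p.1 ∈ emp_man.map Prod.fst ∧
          ∃ h : TChain emp_man p.1, r + 1 ≤ Nat.find h) ∧
        InvM (bBuild emp_man) d ∧
        (∀ e ∈ es, e ∈ d.keys) ∧
        c = cnt + es.foldl (fun s e => s + (d.getD e 0 + 1)) 0 ∧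
        ∀ (fB : Nat) (rest : List (String × Bool)),
          runB (bBuild emp_man) (fB + Δ.length) ((es.map fun e => (e, false)) ++ rest) memo =
          runB (bBuild emp_man) fB rest d := by
  intro es
  induction es with
  | nil =>
    intro memo d cnt c hrun hinv hes
    rw [aLoop] at hrun
    have hdc : memo = d ∧ cnt = c := by simpa using hrun
    obtain ⟨rfl, rfl⟩ := hdc
    refine ⟨[], by simp, by simp, hinv, by simp, by simp, ?_⟩
    intro fB rest
    simp
  | cons e rest ihe =>
    intro memo d cnt c hrun hinv hes
    rw [aLoop] at hrun
    rcases hg : memo.get? e with _ | v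
    · -- employee not yet recorded: A recurses, B will expand
      rw [hg] at hrun
      rcases hgo : aGo (bBuild emp_man) f e memo with _ | ⟨d1, c1⟩
      · rw [hgo] at hrun; cases hrun
      · rw [hgo] at hrun
        dsimp only at hrun
        rw [PySem.Dict.getD_insert_self] at hrun
        obtain ⟨m, hem, he, hfe⟩ := hes e (List.mem_cons_self)
        have hkey : e ∈ emp_man.map Prod.fst :=
          List.mem_map_of_mem (mem_kids emp_man hem).1 (f := Prod.fst)
        have hnotmem : e ∉ memo.keys := (PySem.Dict.get?_eq_none_iff_not_mem_keys memo e).mp hg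
        obtain ⟨Δ1, hit1, hΔ1, hinv1, hrun1⟩ := IH e memo d1 c1 hgo hinv hnotmem he
        have hkeys1 : (d1.insert e c1).keys = memo.keys ++ Δ1.map Prod.fst :=
          keys_of_prefix _ _ _ hit1
        obtain ⟨Δ2, hit2, hΔ2, hinv2, hmem2, hc2, hrun2⟩ :=
          ihe (d1.insert e c1) d _ c hrun hinv1
            (fun x hx => hes x (List.mem_cons_of_mem _ hx))
        have hein : e ∈ (d1.insert e c1).keys := by
          rw [PySem.Dict.mem_keys_insert]; exact Or.inl rfl
        have hgetde : d.getD e 0 = c1 := by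
          rw [getD_of_prefix _ _ _ hit2 e 0 hein, PySem.Dict.getD_insert_self]
        refine ⟨Δ1 ++ Δ2, ?_, ?_, hinv2, ?_, ?_, ?_⟩
        · rw [hit2, hit1, List.append_assoc]
        · intro p hp
          rcases List.mem_append.mp hp with hp1 | hp2
          · obtain ⟨h1, h2, h3, h4⟩ := hΔ1 p hp1
            refine ⟨h1, ?_, ?_⟩
            · rcases List.mem_cons.mp h2 with h5 | h5
              · rw [h5]; exact hkey
              · exact h5
            · exact ⟨h3, by rw [← hfe]; exact h4⟩
          · obtain ⟨h1, h2, h3⟩ := hΔ2 p hp2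
            refine ⟨?_, h2, h3⟩
            intro hmm
            exact h1 (by rw [hkeys1]; exact List.mem_append_left _ hmm)
        · intro x hx
          rcases List.mem_cons.mp hx with h5 | h5
          · subst h5
            rw [keys_of_prefix _ _ _ hit2]
            exact List.mem_append_left _ hein
          · exact hmem2 x h5
        · rw [hc2]
          rw [List.foldl_cons]
          rw [PySem.List.foldl_add, PySem.List.foldl_add, hgetde]
          ring_nf
        · intro fB rest'
          have harith : fB + (Δ1 ++ Δ2).length = (fB + Δ2.length) + Δ1.length := by
            simp [List.length_append]; omega
          rw [harith]
          have h1 := hrun1 (fB + Δ2.length) ((rest.map fun e => (e, false)) ++ rest')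
          have h2 := hrun2 fB rest'
          simp only [List.map_cons, List.cons_append] at *
          rw [h1, h2]
    · -- employee already recorded: A adds its value, B skips the task
      rw [hg] at hrun
      dsimp only at hrun
      obtain ⟨Δ, hit, hΔ, hinv', hmem', hc', hrun'⟩ :=
        ihe memo d _ c hrun hinv (fun x hx => hes x (List.mem_cons_of_mem _ hx))
      have hein : e ∈ memo.keys := mem_keys_of_get? memo e v hg
      have hgetde : d.getD e 0 = v := by
        rw [getD_of_prefix _ _ _ hit e 0 hein]
        exact getD_eq_of_get? memo e v 0 hg
      refine ⟨Δ, hit, hΔ, hinv', ?_, ?_, ?_⟩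
      · intro x hx
        rcases List.mem_cons.mp hx with h5 | h5
        · subst h5
          rw [keys_of_prefix _ _ _ hit]
          exact List.mem_append_left _ hein
        · exact hmem' x h5
      · rw [hc']
        rw [List.foldl_cons]
        rw [PySem.List.foldl_add, PySem.List.foldl_add, hgetde]
        ring_nf
      · intro fB rest'
        have h1 := hrun' fB rest'
        simp only [List.map_cons, List.cons_append] at *
        rw [runB_false_skip _ _ _ _ _ (by rw [hg]; rfl)]
        exact h1

theorem simGo (emp_man : List (String × String))
    (hnd : (emp_man.map Prod.fst).Nodup)
    (hpre : ∀ p ∈ emp_man, chaseL emp_man (emp_man.length + 1) p.1 = true) :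
    ∀ f, SimGoStmt emp_man f := by
  intro f
  induction f with
  | zero =>
    intro n memo d c hgo
    rw [aGo] at hgo
    cases hgo
  | succ f ih =>
    intro n memo d c hgo hinv hnmem hn
    rw [aGo] at hgo
    obtain ⟨Δ0, hit0, hΔ0, hinv0, hmem0, hc0, hrun0⟩ :=
      simLoop emp_man f (Nat.find hn) ih ((bBuild emp_man).getD n []) memo d 0 c hgo hinv
        (fun e he' => by
          obtain ⟨he, h1, h2⟩ := kid_rank emp_man hnd hpre hn he'
          exact ⟨n, he', he, h1⟩)
    have hkeys : d.keys = memo.keys ++ Δ0.map Prod.fst := keys_of_prefix _ _ _ hit0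
    have hnd' : n ∉ d.keys := by
      rw [hkeys]
      intro hmm
      rcases List.mem_append.mp hmm with h5 | h5
      · exact hnmem h5
      · obtain ⟨p, hp, hpe⟩ := List.mem_map.mp h5
        obtain ⟨_, _, h3, h4⟩ := hΔ0 p hp
        subst hpe
        have heq : h3 = hn := Subsingleton.elim h3 hn
        rw [heq] at h4
        omega
    have hcont : d.contains n = false := by
      rcases hc : d.contains n with _ | _
      · rfl
      · exact absurd ((PySem.Dict.contains_iff_mem_keys d n).mp hc) hnd'
    have hsum : bSum (bBuild emp_man) d n = c := by
      rw [hc0]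
      unfold bSum
      omega
    refine ⟨Δ0 ++ [(n, c)], ?_, ?_, ?_, ?_⟩
    · rw [PySem.Dict.items_insert_of_not_contains d c hcont, hit0, List.append_assoc]
    · intro p hp
      rcases List.mem_append.mp hp with h5 | h5
      · obtain ⟨h1, h2, h3, h4⟩ := hΔ0 p h5
        exact ⟨h1, List.mem_cons_of_mem _ h2, h3, by omega⟩
      · have : p = (n, c) := by simpa using h5
        subst this
        exact ⟨hnmem, List.mem_cons_self, hn, le_refl _⟩
    · constructor
      · exact PySem.Dict.nodup_keys_insert d n c hinv0.1
      · intro k hk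
        rcases (PySem.Dict.mem_keys_insert d n k c).mp hk with h5 | h5
        · subst h5
          constructor
          · intro x hx
            exact (PySem.Dict.mem_keys_insert d k x c).mpr (Or.inr (hmem0 x hx))
          · rw [PySem.Dict.getD_insert_self]
            rw [← hsum]
            apply bSum_congr
            intro x hx
            have hxk : x ≠ k := by
              intro hxx
              exact hnd' (hxx ▸ hmem0 x hx)
            exact (PySem.Dict.getD_insert_of_ne d _ 0 hxk).symm
        · have hkn : k ≠ n := by
            intro hkk
            exact hnd' (hkk ▸ h5)
          obtain ⟨hks, hkv⟩ := hinv0.2 k h5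
          constructor
          · intro x hx
            exact (PySem.Dict.mem_keys_insert d n x c).mpr (Or.inr (hks x hx))
          · rw [PySem.Dict.getD_insert_of_ne d c 0 hkn, hkv]
            apply bSum_congr
            intro x hx
            have hxn : x ≠ n := by
              intro hxx
              exact hnd' (hxx ▸ hks x hx)
            exact (PySem.Dict.getD_insert_of_ne d _ 0 hxn).symm
    · intro fB rest
      have hget : (memo.get? n).isSome = false := by
        rw [(PySem.Dict.get?_eq_none_iff_not_mem_keys memo n).mpr hnmem]; rfl
      have hlen : (Δ0 ++ [(n, c)]).length = Δ0.length + 1 := by simp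
      rw [hlen, ← Nat.add_assoc, runB_false_expand _ _ _ _ _ hget, hrun0 fB ((n, true) :: rest),
        runB_true, hsum]



theorem aGo_succ (me : PySem.Dict String (List String)) (f : Nat) (n : String)
    (memo : PySem.Dict String Int) :
    aGo me (f + 1) n memo = aLoop me f (me.getD n []) memo 0 := by
  rw [aGo]

theorem loopAllIn (me : PySem.Dict String (List String)) (f : Nat) :
    ∀ (es : List String) (memo : PySem.Dict String Int) (cnt : Int),
      (∀ e ∈ es, e ∈ memo.keys) →
      aLoop me f es memo cnt =
        some (memo, cnt + es.foldl (fun s e => s + (memo.getD e 0 + 1)) 0) := by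
  intro es
  induction es with
  | nil => intro memo cnt _; rw [aLoop]; simp
  | cons e rest ihe =>
    intro memo cnt hes
    rcases hg : memo.get? e with _ | v
    · exact absurd ((PySem.Dict.get?_eq_none_iff_not_mem_keys memo e).mp hg)
        (by simpa using hes e List.mem_cons_self)
    · rw [aLoop, hg]
      dsimp only
      rw [ihe memo _ (fun x hx => hes x (List.mem_cons_of_mem _ hx))]
      have hv : memo.getD e 0 = v := getD_eq_of_get? memo e v 0 hg
      rw [List.foldl_cons, PySem.List.foldl_add, PySem.List.foldl_add, hv]
      congr 1
      ring_nf

theorem keys_bBuild (emp_man : List (String × String)) (m : String) :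
    m ∈ (bBuild emp_man).keys ↔ ∃ p, p ∈ emp_man ∧ (p.1 == p.2) = false ∧ p.2 = m := by
  unfold bBuild
  rw [bBuild_foldl]
  have hk := PySem.Dict.keys_foldl_modify_key
    (l := emp_man.filter (fun p => !(p.1 == p.2))) (key := fun p => p.2) (d0 := ([] : List String))
    (f := fun d p => fun l => l ++ [p.1]) (d := PySem.Dict.empty)
  rw [hk, PySem.Dict.keys_empty, PySem.Set.update_nil_left, PySem.Set.mem_ofList]
  constructor
  · intro h
    obtain ⟨p, hp, hpe⟩ := List.mem_map.mp h
    obtain ⟨h1, h2⟩ := List.mem_filter.mp hp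
    exact ⟨p, h1, by simpa using h2, hpe⟩
  · intro ⟨p, h1, h2, h3⟩
    exact List.mem_map.mpr ⟨p, List.mem_filter.mpr ⟨h1, by simpa using h2⟩, h3⟩

theorem topFold (emp_man : List (String × String))
    (hnd : (emp_man.map Prod.fst).Nodup)
    (hpre : ∀ p ∈ emp_man, chaseL emp_man (emp_man.length + 1) p.1 = true) :
    ∀ (l : List (String × List String)) (memo : PySem.Dict String Int),
      (∀ p ∈ l, ∃ q ∈ emp_man, (q.1 == q.2) = false ∧ q.2 = p.1) →
      InvM (bBuild emp_man) memo →
      ∃ res : PySem.Dict String Int,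
        l.foldl
          (fun (o : Option (PySem.Dict String Int)) p =>
            match o with
            | none => none
            | some memo =>
              match aGo (bBuild emp_man) (emp_man.length + 3) p.1 memo with
              | none => none
              | some (d, c) => some (d.insert p.1 c))
          (some memo) = some res ∧
        l.foldl
          (fun (o : Option (PySem.Dict String Int)) p =>
            match o with
            | none => none
            | some memo => runB (bBuild emp_man) (emp_man.length + 2) [(p.1, false)] memo)
          (some memo) = some res := by
  intro l
  induction l with
  | nil => intro memo _ hinv; exact ⟨memo, rfl, rfl⟩
  | cons p rest ih =>
    obtain ⟨n, kl⟩ := p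
    intro memo hl hinv
    simp only [List.foldl_cons]
    by_cases hin : n ∈ memo.keys
    · -- manager already recorded: A recomputes the same value, B skips
      rcases hg : memo.get? n with _ | v
      · exact absurd ((PySem.Dict.get?_eq_none_iff_not_mem_keys memo n).mp hg) (by simpa using hin)
      · have hkids : ∀ e ∈ (bBuild emp_man).getD n [], e ∈ memo.keys := (hinv.2 n hin).1
        have hgo : aGo (bBuild emp_man) (emp_man.length + 3) n memo =
            some (memo, 0 + (((bBuild emp_man).getD n []).foldl
              (fun s e => s + (memo.getD e 0 + 1)) 0)) := by
          rw [show emp_man.length + 3 = (emp_man.length + 2) + 1 by omega,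
            aGo_succ, loopAllIn _ _ _ memo 0 hkids]
        have hsum : (0 : Int) + (((bBuild emp_man).getD n []).foldl
            (fun s e => s + (memo.getD e 0 + 1)) 0) = v := by
          have h1 := (hinv.2 n hin).2
          have h2 : memo.getD n 0 = v := getD_eq_of_get? memo n v 0 hg
          unfold bSum at h1
          omega
        have hins : memo.insert n (0 + (((bBuild emp_man).getD n []).foldl
            (fun s e => s + (memo.getD e 0 + 1)) 0)) = memo := by
          rw [hsum]
          exact insert_same memo n v hinv.1 hg
        rw [hgo]
        dsimp only
        rw [hins]
        rw [runB_false_skip _ _ _ _ _ (by rw [hg]; rfl), runB_nil]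
        exact ih memo (fun x hx => hl x (List.mem_cons_of_mem _ hx)) hinv
    · -- fresh manager: A recurses, B expands; the simulation gives the same dict
      obtain ⟨q, hq, hq1, hq2⟩ := hl (n, kl) List.mem_cons_self
      subst hq2
      have hTe : TChain emp_man q.1 := ⟨_, hpre q hq⟩
      have hfq : emp_man.find? (fun r => r.1 == q.1) = some (q.1, q.2) :=
        find?_nodup emp_man hnd (by simpa using hq)
      have hne : (q.2 == q.1) = false := by
        apply beq_eq_false_iff_ne.mpr
        intro hh
        exact (beq_eq_false_iff_ne.mp hq1) hh.symm
      have hTm : TChain emp_man q.2 := tchain_shift emp_man hfq hne hTe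
      have hrank : Nat.find hTm ≤ emp_man.length + 2 := by
        have h1 := rank_child emp_man hfq hne hTe hTm
        have h2 : Nat.find hTe ≤ emp_man.length + 1 := Nat.find_le (hpre q hq)
        omega
      rcases hgo : aGo (bBuild emp_man) (emp_man.length + 3) q.2 memo with _ | ⟨d, c⟩
      · exact absurd hgo (succGo emp_man hnd hpre _ q.2 memo hTm hrank (by omega))
      · obtain ⟨Δ, hit, hΔ, hinv2, hrun⟩ :=
          simGo emp_man hnd hpre _ q.2 memo d c hgo hinv hin hTm
        have hnodupΔ : (Δ.map Prod.fst).Nodup := by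
          have h1 := hinv2.1
          rw [keys_of_prefix _ _ _ hit] at h1
          exact h1.of_append_right
        have hsubΔ : ∀ x ∈ Δ.map Prod.fst, x ∈ q.2 :: emp_man.map Prod.fst := by
          intro x hx
          obtain ⟨pp, hpp, hppe⟩ := List.mem_map.mp hx
          exact hppe ▸ (hΔ pp hpp).2.1
        have hlen : Δ.length ≤ emp_man.length + 1 := by
          have h1 : (Δ.map Prod.fst).length ≤ (q.2 :: emp_man.map Prod.fst).length := by
            rw [← List.toFinset_card_of_nodup hnodupΔ]
            exact le_trans (Finset.card_le_card (fun x hx =>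
              List.mem_toFinset.mpr (hsubΔ x (List.mem_toFinset.mp hx))))
              (q.2 :: emp_man.map Prod.fst).toFinset_card_le
          simpa using h1
        have hB := hrun (emp_man.length + 2 - Δ.length) []
        rw [show emp_man.length + 2 - Δ.length + Δ.length = emp_man.length + 2 by omega,
          runB_nil] at hB
        dsimp only
        rw [hB]
        exact ih (d.insert q.2 c) (fun x hx => hl x (List.mem_cons_of_mem _ hx)) hinv2

-- ===== VERDICT (by name: the statement is the Claim_ definition above) =====
theorem heirarchy_spec : Claim_equal_heirarchy := by
  intro emp_man _ hpre
  obtain ⟨hnd, hch⟩ := hpre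
  unfold Spec_heirarchy heirarchy heirarchy_alt
  rw [build_eq]
  obtain ⟨res, hA, hB⟩ := topFold emp_man hnd hch (bBuild emp_man).items PySem.Dict.empty
    (fun p hp => by
      have h1 : p.1 ∈ (bBuild emp_man).keys := by
        rw [PySem.Dict.keys]
        exact List.mem_map_of_mem hp
      obtain ⟨q, hq1, hq2, hq3⟩ := (keys_bBuild emp_man p.1).mp h1
      exact ⟨q, hq1, hq2, hq3⟩)
    ⟨by rw [PySem.Dict.keys_empty]; exact List.nodup_nil,
     fun k hk => by rw [PySem.Dict.keys_empty] at hk; cases hk⟩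
  dsimp only
  rw [hA, hB]
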